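-- pv_equiv track=rewrite | github.com/lexnovic/kryptolang | services/parser_service/text_parser.py | parse
-- ===== SOURCE A (Python) =====
-- from collections import OrderedDict
--
-- def parse(text: str) -> dict:
--     """Parse text into structured components with unique words"""
--     words = [w.lower() for w in text.strip().split()]
--     return {
--         'unique_words': list(OrderedDict.fromkeys(words)),
--         'subjects': [w for w in words if w in ['i', 'you', 'he', 'she', 'it']],
--         'verbs': [w for w in words if w in ['eat', 'kill', 'see']],
--         'objects': [w for w in words if w not in ['i', 'you', 'he', 'she', 'it', 'eat', 'kill', 'see']]
--     }
-- ===== SOURCE B (Python) =====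
-- def parse(text: str) -> dict:
--     """Parse text into structured components with unique words (single pass)."""
--     seen = set()
--     unique_words, subjects, verbs, objects = [], [], [], []
--     for w in text.strip().split():
--         w = w.lower()
--         if w not in seen:
--             seen.add(w)
--             unique_words.append(w)
--         if w in ('i', 'you', 'he', 'she', 'it'):
--             subjects.append(w)
--         elif w in ('eat', 'kill', 'see'):
--             verbs.append(w)
--         else:
--             objects.append(w)
--     return {
--         'unique_words': unique_words,
--         'subjects': subjects,
--         'verbs': verbs,
--         'objects': objects,
--     }
-- ===== Notes on version B (the rewrite author's own statement) =====
-- stated objective: alternative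
-- what changed: Replaces A's four separate passes (OrderedDict.fromkeys plus three list comprehensions) by one loop over the lowercased words that maintains a seen-set and classifies each word once with if/elif/else.
import Mathlib
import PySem

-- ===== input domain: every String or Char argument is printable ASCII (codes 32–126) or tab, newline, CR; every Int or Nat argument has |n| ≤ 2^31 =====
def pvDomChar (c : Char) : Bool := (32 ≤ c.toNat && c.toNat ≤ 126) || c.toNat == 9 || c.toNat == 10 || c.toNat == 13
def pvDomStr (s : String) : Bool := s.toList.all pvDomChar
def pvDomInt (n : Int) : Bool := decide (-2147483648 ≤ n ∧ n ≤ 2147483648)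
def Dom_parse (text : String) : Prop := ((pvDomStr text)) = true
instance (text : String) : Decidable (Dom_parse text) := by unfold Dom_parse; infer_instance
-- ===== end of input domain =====

-- B replaces A's four passes (OrderedDict.fromkeys + three comprehensions) by one
-- classifying loop with a seen-set; same results, alternative decomposition.


-- ===== PORT A =====
def parse (text : String) : List (String × List String) :=
  let words := (PySem.Str.split₀ (PySem.Str.strip text)).map (fun w => PySem.Str.lower w)
  [("unique_words", PySem.List.dedup words),
   ("subjects", words.filter (fun w => ["i", "you", "he", "she", "it"].contains w)),
   ("verbs", words.filter (fun w => ["eat", "kill", "see"].contains w)),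
   ("objects", words.filter (fun w =>
      !(["i", "you", "he", "she", "it", "eat", "kill", "see"].contains w)))]

-- ===== PORT B =====
-- one loop state: (seen, unique_words, subjects, verbs, objects)
def parseStep (st : PySem.Set String × List String × List String × List String × List String)
    (w0 : String) : PySem.Set String × List String × List String × List String × List String :=
  let w := PySem.Str.lower w0
  let (seen, u, s, v, o) := st
  let (seen, u) :=
    if PySem.Set.contains seen w then (seen, u) else (PySem.Set.add seen w, u ++ [w])
  if ["i", "you", "he", "she", "it"].contains w then (seen, u, s ++ [w], v, o)
  else if ["eat", "kill", "see"].contains w then (seen, u, s, v ++ [w], o)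
  else (seen, u, s, v, o ++ [w])

def parse_alt (text : String) : List (String × List String) :=
  let st := (PySem.Str.split₀ (PySem.Str.strip text)).foldl parseStep
              (PySem.Set.empty, [], [], [], [])
  [("unique_words", st.2.1), ("subjects", st.2.2.1),
   ("verbs", st.2.2.2.1), ("objects", st.2.2.2.2)]

-- ===== PRECONDITION & SPEC =====
def Spec_parse (text : String) (out : List (String × List String)) : Prop := out = parse_alt text
instance (text : String) (out : List (String × List String)) : Decidable (Spec_parse text out) := by unfold Spec_parse; infer_instance

-- ===== CLAIM (what is proved, stated in full; the proofs are below) =====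
def Claim_equal_parse : Prop := ∀ (text : String), Dom_parse text → Spec_parse text (parse text)

-- ===== LEMMAS AND PROOFS =====

theorem subj_verb_disjoint (x : String) (h : x = "i" ∨ x = "you" ∨ x = "he" ∨ x = "she" ∨ x = "it") :
    ¬(x = "eat" ∨ x = "kill" ∨ x = "see") := by
  rcases h with rfl | rfl | rfl | rfl | rfl <;> simp

theorem fold_spec (ws : List String) (u s v o : List String) :
    ws.foldl parseStep (u, u, s, v, o) =
      (PySem.Set.update u (ws.map (fun w => PySem.Str.lower w)),
       PySem.Set.update u (ws.map (fun w => PySem.Str.lower w)),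
       s ++ (ws.map (fun w => PySem.Str.lower w)).filter
              (fun w => ["i", "you", "he", "she", "it"].contains w),
       v ++ (ws.map (fun w => PySem.Str.lower w)).filter
              (fun w => ["eat", "kill", "see"].contains w),
       o ++ (ws.map (fun w => PySem.Str.lower w)).filter (fun w =>
              !(["i", "you", "he", "she", "it", "eat", "kill", "see"].contains w))) := by
  induction ws generalizing u s v o with
  | nil => simp [PySem.Set.update]
  | cons w ws ih =>
    have hstep : parseStep (u, u, s, v, o) w =
        (PySem.Set.add u (PySem.Str.lower w), PySem.Set.add u (PySem.Str.lower w),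
         (if ["i", "you", "he", "she", "it"].contains (PySem.Str.lower w) then s ++ [PySem.Str.lower w] else s),
         (if ["eat", "kill", "see"].contains (PySem.Str.lower w) then v ++ [PySem.Str.lower w] else v),
         (if !(["i", "you", "he", "she", "it", "eat", "kill", "see"].contains (PySem.Str.lower w))
            then o ++ [PySem.Str.lower w] else o)) := by
      simp only [parseStep, PySem.Set.add, PySem.Set.contains,
        List.contains_eq_mem, List.mem_cons, List.not_mem_nil, or_false,
        Bool.not_eq_eq_eq_not, Bool.not_true, decide_eq_true_eq, decide_eq_false_iff_not,
        Bool.not_and]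
      split_ifs <;> simp_all <;> first | rfl | (exfalso; exact subj_verb_disjoint _ (by tauto) (by tauto))
    simp only [List.foldl_cons, hstep]
    rw [ih]
    simp [PySem.Set.update, List.filter_cons]
    split_ifs <;> simp_all [List.append_assoc]

theorem parse_eq_alt (text : String) : parse text = parse_alt text := by
  unfold parse parse_alt
  have h := fold_spec (PySem.Str.split₀ (PySem.Str.strip text)) [] [] [] []
  simp only [PySem.Set.empty] at h ⊢
  rw [h]
  simp [PySem.List.dedup_eq_ofList, PySem.Set.ofList, PySem.Set.update]

-- ===== VERDICT (by name: the statement is the Claim_ definition above) =====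
theorem parse_spec : Claim_equal_parse := by
  intro text _
  unfold Spec_parse
  exact parse_eq_alt text
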